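-- pv_equiv track=rewrite | github.com/csu-signal/Roleplay-for-Collaborative-Dialogues | common_ground_eval.py | map_initial_solutions_to_framework
-- ===== SOURCE A (Python) =====
-- def map_initial_solutions_to_framework(initial_solutions):
--     """
--     Map initial solutions to the CEOV framework.
--
--     Args:
--         initial_solutions: Dictionary mapping participant names to lists of selected cards
--
--     Returns:
--         Dictionary mapping participant names to solution framework strings
--     """
--     mapped_solutions = {}
--
--     # Handle different formats of initial_solutions
--     if isinstance(initial_solutions, str):
--         try:
--             import json
--             initial_solutions = json.loads(initial_solutions.replace("'", '"'))
--         except: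
--             logger.warning(f"Could not parse initial_solutions string: {initial_solutions}")
--             return mapped_solutions
--
--     if not isinstance(initial_solutions, dict):
--         logger.warning(f"Initial solutions is not a dictionary: {type(initial_solutions)}")
--         return mapped_solutions
--
--     for participant, cards in initial_solutions.items():
--         if not cards:  # Skip if no cards
--             continue
--
--         solution = ''
--
--         # Check for consonant
--         if any(card.isalpha() and card.upper() not in 'AEIOU' for card in cards):
--             solution += 'C'
--
--         # Check for even number
--         if any(card.isdigit() and int(card) % 2 == 0 for card in cards):
--             solution += 'E'
--
--         # Check for odd number
--         if any(card.isdigit() and int(card) % 2 == 1 for card in cards):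
--             solution += 'O'
--
--         # Check for vowel
--         if any(card.isalpha() and card.upper() in 'AEIOU' for card in cards):
--             solution += 'V'
--
--         mapped_solutions[participant] = solution if solution else 'none'
--
--     return mapped_solutions
-- ===== SOURCE B (Python) =====
-- def map_initial_solutions_to_framework(initial_solutions):
--     """Single-pass CEOV classification: one loop per card list accumulating
--     four flags, instead of four separate any()-scans."""
--     mapped_solutions = {}
--
--     if isinstance(initial_solutions, str):
--         try:
--             import json
--             initial_solutions = json.loads(initial_solutions.replace("'", '"'))
--         except:
--             return mapped_solutions
--
--     if not isinstance(initial_solutions, dict):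
--         return mapped_solutions
--
--     for participant, cards in initial_solutions.items():
--         if not cards:
--             continue
--         has_c = has_e = has_o = has_v = False
--         for card in cards:
--             if card.isalpha():
--                 if card.upper() in 'AEIOU':
--                     has_v = True
--                 else:
--                     has_c = True
--             elif card.isdigit():
--                 if int(card) % 2 == 0:
--                     has_e = True
--                 else:
--                     has_o = True
--         letters = []
--         if has_c:
--             letters.append('C')
--         if has_e:
--             letters.append('E')
--         if has_o:
--             letters.append('O')
--         if has_v:
--             letters.append('V')
--         mapped_solutions[participant] = ''.join(letters) if letters else 'none'
--
--     return mapped_solutions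
-- ===== Notes on version B (the rewrite author's own statement) =====
-- stated objective: alternative
-- what changed: Replaces the four separate any() scans over each participant's cards with a single loop that classifies each card once (alpha/digit, vowel/consonant, even/odd) into four boolean flags, then assembles the 'CEOV' string from the flags.
import Mathlib
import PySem

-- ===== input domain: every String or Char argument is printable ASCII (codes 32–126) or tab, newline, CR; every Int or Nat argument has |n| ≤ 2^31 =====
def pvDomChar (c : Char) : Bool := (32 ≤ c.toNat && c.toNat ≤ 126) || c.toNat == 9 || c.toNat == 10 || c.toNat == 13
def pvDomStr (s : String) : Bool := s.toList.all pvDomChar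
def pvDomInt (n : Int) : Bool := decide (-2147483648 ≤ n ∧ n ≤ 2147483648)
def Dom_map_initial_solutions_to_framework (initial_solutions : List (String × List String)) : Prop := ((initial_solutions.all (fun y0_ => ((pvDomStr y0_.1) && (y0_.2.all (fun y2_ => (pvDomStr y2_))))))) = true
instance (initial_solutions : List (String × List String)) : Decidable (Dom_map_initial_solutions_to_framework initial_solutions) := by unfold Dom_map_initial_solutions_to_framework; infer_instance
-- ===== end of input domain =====

-- B replaces A's four separate any() scans over each card list by a single classifying
-- pass accumulating four boolean flags (objective: alternative decomposition, same cost).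
-- The argument arrives as a dict (assoc list), so A's isinstance(str)/isinstance(dict)
-- format-glue branches are vacuous here and both ports start at the items() loop.

-- ===== PORT A =====
-- the per-card predicates of A's four any(...) comprehensions, verbatim
def pvIsCons (card : String) : Bool :=
  PySem.Str.strIsalpha card && !(PySem.Str.isIn (PySem.Str.upper card) "AEIOU")
def pvIsEven (card : String) : Bool :=
  PySem.Str.strIsdigit card && (PySem.Int.mod ((PySem.Int.ofStr? card).getD 0) 2 == 0)
def pvIsOdd (card : String) : Bool :=
  PySem.Str.strIsdigit card && (PySem.Int.mod ((PySem.Int.ofStr? card).getD 0) 2 == 1)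
def pvIsVowel (card : String) : Bool :=
  PySem.Str.strIsalpha card && PySem.Str.isIn (PySem.Str.upper card) "AEIOU"

def map_initial_solutions_to_framework (initial_solutions : List (String × List String)) : List (String × String) :=
  -- mapped_solutions = {} ; for participant, cards in initial_solutions.items(): …
  (initial_solutions.foldl (fun (mapped : PySem.Dict String String) pc =>
    let participant := pc.1
    let cards := pc.2
    if cards.isEmpty then mapped          -- if not cards: continue
    else
      let solution0 := ""
      let solution1 := if cards.any pvIsCons then solution0 ++ "C" else solution0
      let solution2 := if cards.any pvIsEven then solution1 ++ "E" else solution1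
      let solution3 := if cards.any pvIsOdd then solution2 ++ "O" else solution2
      let solution4 := if cards.any pvIsVowel then solution3 ++ "V" else solution3
      mapped.insert participant (if solution4 == "" then "none" else solution4))
    PySem.Dict.empty).items

-- ===== PORT B =====
def map_initial_solutions_to_framework_alt (initial_solutions : List (String × List String)) : List (String × String) :=
  (initial_solutions.foldl (fun (mapped : PySem.Dict String String) pc =>
    let participant := pc.1
    let cards := pc.2
    if cards.isEmpty then mapped
    else
      -- single pass: classify each card once into four flags (has_c, has_e, has_o, has_v)
      let flags := cards.foldl (fun (f : Bool × Bool × Bool × Bool) card =>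
        if PySem.Str.strIsalpha card then
          if PySem.Str.isIn (PySem.Str.upper card) "AEIOU" then (f.1, f.2.1, f.2.2.1, true)
          else (true, f.2.1, f.2.2.1, f.2.2.2)
        else if PySem.Str.strIsdigit card then
          if PySem.Int.mod ((PySem.Int.ofStr? card).getD 0) 2 == 0 then (f.1, true, f.2.2.1, f.2.2.2)
          else (f.1, f.2.1, true, f.2.2.2)
        else f) (false, false, false, false)
      let letters := (if flags.1 then ['C'] else []) ++ (if flags.2.1 then ['E'] else [])
                   ++ (if flags.2.2.1 then ['O'] else []) ++ (if flags.2.2.2 then ['V'] else [])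
      mapped.insert participant (if letters.isEmpty then "none" else String.ofList letters))
    PySem.Dict.empty).items

-- ===== PRECONDITION & SPEC =====
def Spec_map_initial_solutions_to_framework (initial_solutions : List (String × List String)) (out : List (String × String)) : Prop := out = map_initial_solutions_to_framework_alt initial_solutions
instance (initial_solutions : List (String × List String)) (out : List (String × String)) : Decidable (Spec_map_initial_solutions_to_framework initial_solutions out) := by unfold Spec_map_initial_solutions_to_framework; infer_instance

-- ===== CLAIM (what is proved, stated in full; the proofs are below) =====
def Claim_equal_map_initial_solutions_to_framework : Prop := ∀ (initial_solutions : List (String × List String)), Dom_map_initial_solutions_to_framework initial_solutions → Spec_map_initial_solutions_to_framework initial_solutions (map_initial_solutions_to_framework initial_solutions)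

-- ===== LEMMAS AND PROOFS =====

-- no card is both alphabetic and a digit string
lemma pvCharNotBoth (c : Char) (h1 : PySem.Chars.isalpha c = true)
    (h3 : PySem.Chars.isdigit c = true) : False := by
  simp [PySem.Chars.isalpha, PySem.Chars.isupper, PySem.Chars.islower, PySem.Chars.isdigit] at h1 h3
  simp [Char.le_def, UInt32.le_iff_toNat_le] at h1 h3
  omega

lemma pvNotBoth (l : List Char) (h1 : PySem.Chars.strIsalpha l = true)
    (h3 : PySem.Chars.strIsdigit l = true) : False := by
  simp [PySem.Chars.strIsalpha, PySem.Chars.strIsdigit] at h1 h3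
  obtain ⟨hne, ha⟩ := h1
  obtain ⟨-, hd⟩ := h3
  obtain ⟨c, hc⟩ := List.exists_mem_of_ne_nil l hne
  exact pvCharNotBoth c (ha c hc) (hd c hc)

-- B's single pass computes exactly the four any()-flags of A (or-accumulated onto the start state)
lemma pvFlags_eq (cards : List String) (f : Bool × Bool × Bool × Bool) :
    cards.foldl (fun (f : Bool × Bool × Bool × Bool) card =>
        if PySem.Str.strIsalpha card then
          if PySem.Str.isIn (PySem.Str.upper card) "AEIOU" then (f.1, f.2.1, f.2.2.1, true)
          else (true, f.2.1, f.2.2.1, f.2.2.2)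
        else if PySem.Str.strIsdigit card then
          if PySem.Int.mod ((PySem.Int.ofStr? card).getD 0) 2 == 0 then (f.1, true, f.2.2.1, f.2.2.2)
          else (f.1, f.2.1, true, f.2.2.2)
        else f) f
      = (f.1 || cards.any pvIsCons, f.2.1 || cards.any pvIsEven,
         f.2.2.1 || cards.any pvIsOdd, f.2.2.2 || cards.any pvIsVowel) := by
  induction cards generalizing f with
  | nil => simp
  | cons card rest ih =>
    simp only [List.foldl_cons, List.any_cons, ih]
    obtain ⟨a, b, c, d⟩ := f
    rcases Int.emod_two_eq ((PySem.Int.ofStr? card).getD 0) with hp | hp <;>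
      by_cases h1 : PySem.Chars.strIsalpha card.toList = true <;>
        by_cases h2 : PySem.Chars.isIn (PySem.Chars.upper card.toList) ['A','E','I','O','U'] = true <;>
          by_cases h3 : PySem.Chars.strIsdigit card.toList = true <;>
            first
            | exact (pvNotBoth _ h1 h3).elim
            | simp [pvIsCons, pvIsEven, pvIsOdd, pvIsVowel, h1, h2, h3, hp]

-- per pair, the two loop bodies agree
lemma pvStep_eq :
    (fun (mapped : PySem.Dict String String) (pc : String × List String) =>
      let participant := pc.1
      let cards := pc.2
      if cards.isEmpty then mapped
      else
        let solution0 := ""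
        let solution1 := if cards.any pvIsCons then solution0 ++ "C" else solution0
        let solution2 := if cards.any pvIsEven then solution1 ++ "E" else solution1
        let solution3 := if cards.any pvIsOdd then solution2 ++ "O" else solution2
        let solution4 := if cards.any pvIsVowel then solution3 ++ "V" else solution3
        mapped.insert participant (if solution4 == "" then "none" else solution4))
    = (fun (mapped : PySem.Dict String String) (pc : String × List String) =>
      let participant := pc.1
      let cards := pc.2
      if cards.isEmpty then mapped
      else
        let flags := cards.foldl (fun (f : Bool × Bool × Bool × Bool) card =>
          if PySem.Str.strIsalpha card then
            if PySem.Str.isIn (PySem.Str.upper card) "AEIOU" then (f.1, f.2.1, f.2.2.1, true)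
            else (true, f.2.1, f.2.2.1, f.2.2.2)
          else if PySem.Str.strIsdigit card then
            if PySem.Int.mod ((PySem.Int.ofStr? card).getD 0) 2 == 0 then (f.1, true, f.2.2.1, f.2.2.2)
            else (f.1, f.2.1, true, f.2.2.2)
          else f) (false, false, false, false)
        let letters := (if flags.1 then ['C'] else []) ++ (if flags.2.1 then ['E'] else [])
                     ++ (if flags.2.2.1 then ['O'] else []) ++ (if flags.2.2.2 then ['V'] else [])
        mapped.insert participant (if letters.isEmpty then "none" else String.ofList letters)) := by
  funext mapped pc
  obtain ⟨participant, cards⟩ := pc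
  by_cases hemp : cards.isEmpty
  · simp [hemp]
  · simp only [hemp, pvFlags_eq, Bool.false_or]
    cases hc : cards.any pvIsCons <;> cases he : cards.any pvIsEven <;>
      cases ho : cards.any pvIsOdd <;> cases hv : cards.any pvIsVowel <;> rfl

-- ===== VERDICT (by name: the statement is the Claim_ definition above) =====
theorem map_initial_solutions_to_framework_spec : Claim_equal_map_initial_solutions_to_framework := by
  intro xs _
  show _ = _
  unfold map_initial_solutions_to_framework map_initial_solutions_to_framework_alt
  rw [pvStep_eq]
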